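-- pv_equiv track=rewrite | github.com/chrissuu/pentominoes | draw.py | get_region_info
-- ===== SOURCE A (Python) =====
-- from collections import defaultdict
--
-- EMPTY_CHAR = '-'
--
-- INSIDE_CHAR = '+'
--
-- def get_region_info(board: list[list[str]]) -> dict:
--     """Get area of each colored region using flood fill."""
--     rows, cols = len(board), len(board[0])
--     visited = [[False] * cols for _ in range(rows)]
--     regions = defaultdict(int)
--
--     def flood_fill(r, c, char):
--         if r < 0 or r >= rows or c < 0 or c >= cols:
--             return 0
--         if visited[r][c] or board[r][c] != char:
--             return 0
--
--         visited[r][c] = True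
--         count = 1
--         count += flood_fill(r + 1, c, char)
--         count += flood_fill(r - 1, c, char)
--         count += flood_fill(r, c + 1, char)
--         count += flood_fill(r, c - 1, char)
--         return count
--
--     for r in range(rows):
--         for c in range(cols):
--             if not visited[r][c] and board[r][c] not in [EMPTY_CHAR, INSIDE_CHAR]:
--                 char = board[r][c]
--                 area = flood_fill(r, c, char)
--                 if char not in regions:
--                     regions[char] = area
--
--     return regions
-- ===== SOURCE B (Python) =====
-- EMPTY_CHAR = '-'
--
-- INSIDE_CHAR = '+'
--
-- def get_region_info(board):
--     """Area of the first region per color: explicit-stack fill over a visited SET of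
--     coordinates (no boolean matrix), scanning rows with enumerate."""
--     rows, cols = len(board), len(board[0])
--     visited = set()
--     regions = {}
--     for r, row in enumerate(board):
--         for c in range(cols):
--             ch = row[c]
--             if (r, c) not in visited and ch != EMPTY_CHAR and ch != INSIDE_CHAR:
--                 area = 0
--                 stack = [(r, c)]
--                 while stack:
--                     cell = stack.pop()
--                     if cell in visited:
--                         continue
--                     rr, cc = cell
--                     if not (0 <= rr < rows and 0 <= cc < cols) or board[rr][cc] != ch:
--                         continue
--                     visited.add(cell)
--                     area += 1
--                     stack.extend([(rr, cc - 1), (rr, cc + 1), (rr - 1, cc), (rr + 1, cc)])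
--                 if ch not in regions:
--                     regions[ch] = area
--     return regions
-- ===== Notes on version B (the rewrite author's own statement) =====
-- stated objective: alternative
-- what changed: The recursive flood_fill over a 2D boolean visited matrix is replaced by an explicit-stack fill that tracks visited cells in a SET of coordinates, with the outer scan driven by enumerate over rows; same skip rule and first-region-per-color rule, no recursion and no preallocated matrix.
import Mathlib
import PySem

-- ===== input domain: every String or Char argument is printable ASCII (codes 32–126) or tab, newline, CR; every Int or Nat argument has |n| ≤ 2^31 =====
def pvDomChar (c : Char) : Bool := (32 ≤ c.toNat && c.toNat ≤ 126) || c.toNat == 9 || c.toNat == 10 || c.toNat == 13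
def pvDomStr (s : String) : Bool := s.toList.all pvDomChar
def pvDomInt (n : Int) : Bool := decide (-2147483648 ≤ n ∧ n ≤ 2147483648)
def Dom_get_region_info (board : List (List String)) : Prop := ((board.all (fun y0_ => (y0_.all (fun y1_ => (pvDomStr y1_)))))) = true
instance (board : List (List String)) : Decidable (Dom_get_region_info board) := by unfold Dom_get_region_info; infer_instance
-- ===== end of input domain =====

-- B replaces A's recursive flood_fill over a 2D boolean visited matrix by an explicit-stack fill
-- tracking visited cells in a set of coordinates, scanning rows with enumerate (objective:
-- alternative); the skip rule and the first-region-per-color rule are unchanged.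

-- ===== PORT A =====
-- A's board/visited accessors: board[r][c], visited[r][c], visited[r][c] = True

def pvCell (board : List (List String)) (r c : Nat) : String := (board.getD r []).getD c ""

def pvVis (v : List (List Bool)) (r c : Nat) : Bool := (v.getD r []).getD c false

def pvMark (v : List (List Bool)) (r c : Nat) : List (List Bool) := v.set r ((v.getD r []).set c true)

-- A's recursive flood_fill; the fuel argument only makes the recursion structural (it is decremented
-- exactly when a cell is marked visited, and is never exhausted when fuel ≥ number of unvisited cells
-- — proved below), so with fuel = rows*cols the port computes exactly what A's flood_fill computes.

def floodA (board : List (List String)) (rows cols : Int) (ch : String) :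
    Nat → Int → Int → List (List Bool) → Int × List (List Bool)
  | fuel, r, c, v =>
    if r < 0 ∨ rows ≤ r ∨ c < 0 ∨ cols ≤ c then (0, v)
    else if pvVis v r.toNat c.toNat = true ∨ ¬ pvCell board r.toNat c.toNat = ch then (0, v)
    else match fuel with
      | 0 => (0, v)
      | fuel + 1 =>
        let v0 := pvMark v r.toNat c.toNat
        let p1 := floodA board rows cols ch fuel (r + 1) c v0
        let p2 := floodA board rows cols ch fuel (r - 1) c p1.2
        let p3 := floodA board rows cols ch fuel r (c + 1) p2.2
        let p4 := floodA board rows cols ch fuel r (c - 1) p3.2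
        (1 + p1.1 + p2.1 + p3.1 + p4.1, p4.2)

def get_region_info (board : List (List String)) : List (String × Int) :=
  let rows := board.length
  let cols := (board.getD 0 []).length
  let init : List (List Bool) × PySem.Dict String Int :=
    (List.replicate rows (List.replicate cols false), PySem.Dict.empty)
  let final := (List.range rows).foldl (fun st r =>
    (List.range cols).foldl (fun st c =>
      if pvVis st.1 r c = false ∧ ¬ pvCell board r c ∈ ["-", "+"] then
        let ch := pvCell board r c
        let p := floodA board (rows : Int) (cols : Int) ch (rows * cols) (r : Int) (c : Int) st.1
        (p.2, if st.2.contains ch = false then st.2.insert ch p.1 else st.2)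
      else st) st) init
  final.2.items


-- ===== PORT B =====
-- B's board accessor on a coordinate pair (read only after the bounds test passes)

def cellB (board : List (List String)) (p : Int × Int) : String :=
  (board.getD p.1.toNat []).getD p.2.toNat ""

-- B's while-loop: pop a cell (list head = top of the Python stack), skip it if already in the
-- visited set, skip it if out of bounds or the wrong character, otherwise add it to the set,
-- count it and push the four neighbours; fuel is decremented exactly when a cell is added.

def fillB (board : List (List String)) (rows cols : Int) (ch : String) :
    Nat → List (Int × Int) → Int → List (Int × Int) → Int × List (Int × Int)
  | _, [], area, vis => (area, vis)
  | fuel, cell :: stack, area, vis =>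
    if vis.contains cell then fillB board rows cols ch fuel stack area vis
    else if 0 ≤ cell.1 ∧ cell.1 < rows ∧ 0 ≤ cell.2 ∧ cell.2 < cols ∧ cellB board cell = ch then
      match fuel with
      | 0 => (area, vis)
      | fuel + 1 =>
        fillB board rows cols ch fuel
          ((cell.1 + 1, cell.2) :: (cell.1 - 1, cell.2) :: (cell.1, cell.2 + 1) :: (cell.1, cell.2 - 1) :: stack)
          (area + 1) (cell :: vis)
    else fillB board rows cols ch fuel stack area vis
termination_by fuel stack => (fuel, stack.length)

def get_region_info_alt (board : List (List String)) : List (String × Int) :=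
  let rows := board.length
  let cols := (board.getD 0 []).length
  let final := (PySem.List.enumerate board).foldl (fun st rrow =>
    (List.range cols).foldl (fun (st : List (Int × Int) × PySem.Dict String Int) (c : Nat) =>
      let ch := rrow.2.getD c ""
      if st.1.contains (rrow.1, (c : Int)) = false ∧ ch ≠ "-" ∧ ch ≠ "+" then
        let q := fillB board (rows : Int) (cols : Int) ch (rows * cols) [(rrow.1, (c : Int))] 0 st.1
        (q.2, if st.2.contains ch = false then st.2.insert ch q.1 else st.2)
      else st) st) (([] : List (Int × Int)), (PySem.Dict.empty : PySem.Dict String Int))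
  final.2.items


-- ===== PRECONDITION & SPEC =====
-- Pre_ excludes exactly the inputs on which Python A raises IndexError: the empty board (len(board[0]))
-- and ragged boards having a row shorter than row 0 (board[r][c] for c < len(board[0])).
def Pre_get_region_info (board : List (List String)) : Prop :=
  board ≠ [] ∧ ∀ row ∈ board, (board.headD []).length ≤ row.length
instance (board : List (List String)) : Decidable (Pre_get_region_info board) := by
  unfold Pre_get_region_info; infer_instance
def pvWitness_get_region_info : List (List String) :=
  [["a", "a", "-"], ["b", "a", "+"], ["b", "-", "a"]]
def Spec_get_region_info (board : List (List String)) (out : List (String × Int)) : Prop := out = get_region_info_alt board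
instance (board : List (List String)) (out : List (String × Int)) : Decidable (Spec_get_region_info board out) := by unfold Spec_get_region_info; infer_instance

-- ===== CLAIM (what is proved, stated in full; the proofs are below) =====
def Claim_equal_get_region_info : Prop := ∀ (board : List (List String)), Dom_get_region_info board → Pre_get_region_info board → Spec_get_region_info board (get_region_info board)

-- ===== LEMMAS AND PROOFS =====

-- dimensions invariant of A's visited matrix, and the count of its unvisited cells (the fuel measure)

def pvWf (rows cols : Nat) (v : List (List Bool)) : Prop :=
  v.length = rows ∧ ∀ row ∈ v, row.length = cols

def pvUnvis (v : List (List Bool)) : Nat := (v.map (fun row => row.count false)).sum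

-- the simulation relation: B's visited set holds exactly the in-bounds cells A's matrix marks

def pvRel (rows cols : Nat) (v : List (List Bool)) (S : List (Int × Int)) : Prop :=
  S.Nodup ∧ ∀ p : Int × Int,
    p ∈ S ↔ 0 ≤ p.1 ∧ p.1 < (rows : Int) ∧ 0 ≤ p.2 ∧ p.2 < (cols : Int) ∧
      pvVis v p.1.toNat p.2.toNat = true

theorem pvWf_mark (rows cols : Nat) (v : List (List Bool)) (r c : Nat)
    (h : pvWf rows cols v) : pvWf rows cols (pvMark v r c) := by
  obtain ⟨h1, h2⟩ := h
  by_cases hr : r < v.length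
  · refine ⟨by simpa [pvMark] using h1, ?_⟩
    intro row hrow
    rcases List.mem_or_eq_of_mem_set hrow with h | h
    · exact h2 _ h
    · subst h
      rw [List.length_set]
      exact h2 _ (by rw [List.getD_eq_getElem _ _ hr]; exact List.getElem_mem hr)
  · rw [pvMark, List.set_eq_of_length_le (by omega)]
    exact ⟨h1, h2⟩

theorem row_count_set (row : List Bool) (c : Nat) (hc : c < row.length)
    (hf : row.getD c false = false) : (row.set c true).count false + 1 = row.count false := by
  induction row generalizing c with
  | nil => simp at hc
  | cons b t ih =>
    cases c with
    | zero => simp_all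
    | succ c =>
      simp only [List.set_cons_succ, List.count_cons]
      have := ih c (by simpa using hc) (by simpa using hf)
      omega

theorem pvUnvis_mark (rows cols : Nat) (v : List (List Bool)) (r c : Nat)
    (h : pvWf rows cols v) (hr : r < rows) (hc : c < cols)
    (hv : pvVis v r c = false) : pvUnvis (pvMark v r c) + 1 = pvUnvis v := by
  obtain ⟨h1, h2⟩ := h
  induction v generalizing r rows with
  | nil => simp at h1; omega
  | cons hd t ih =>
    cases r with
    | zero =>
      have hlen : hd.length = cols := h2 _ (by simp)
      simp only [pvMark, pvVis, List.getD_cons_zero, List.set_cons_zero] at *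
      simp only [pvUnvis, List.map_cons, List.sum_cons]
      have := row_count_set hd c (by omega) hv
      omega
    | succ r =>
      cases rows with
      | zero => omega
      | succ rows =>
        simp only [pvMark, pvVis, List.getD_cons_succ, List.set_cons_succ] at *
        simp only [pvUnvis, List.map_cons, List.sum_cons]
        have := ih rows r (by omega) hv (by simpa using h1) (fun row hrow => h2 _ (by simp [hrow]))
        simp only [pvUnvis] at this
        omega

theorem pvUnvis_pos (rows cols : Nat) (v : List (List Bool)) (r c : Nat)
    (h : pvWf rows cols v) (hr : r < rows) (hc : c < cols)
    (hv : pvVis v r c = false) : 1 ≤ pvUnvis v := by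
  have := pvUnvis_mark rows cols v r c h hr hc hv; omega

theorem pvUnvis_le (rows cols : Nat) (v : List (List Bool)) (h : pvWf rows cols v) :
    pvUnvis v ≤ rows * cols := by
  obtain ⟨h1, h2⟩ := h
  induction v generalizing rows with
  | nil => simp [pvUnvis]
  | cons hd t ih =>
    cases rows with
    | zero => simp at h1
    | succ rows =>
      simp only [pvUnvis, List.map_cons, List.sum_cons]
      have hhd : hd.count false ≤ cols := by
        have := h2 hd (by simp); simpa [this] using List.count_le_length (l := hd) (a := false)
      have := ih rows (by simpa using h1) (fun row hrow => h2 _ (by simp [hrow]))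
      simp only [pvUnvis] at this
      have : (t.map (fun row => row.count false)).sum ≤ rows * cols := this
      calc hd.count false + (t.map (fun row => row.count false)).sum ≤ cols + rows * cols := by omega
        _ = (rows + 1) * cols := by ring

-- reading the matrix after a mark

theorem pvVis_mark_self (rows cols : Nat) (v : List (List Bool)) (r c : Nat)
    (h : pvWf rows cols v) (hr : r < rows) (hc : c < cols) :
    pvVis (pvMark v r c) r c = true := by
  obtain ⟨h1, h2⟩ := h
  have hrv : r < v.length := by omega
  have hrow : (v.getD r []).length = cols := by
    rw [List.getD_eq_getElem _ _ hrv]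
    exact h2 _ (List.getElem_mem hrv)
  unfold pvVis pvMark
  simp only [List.getD_eq_getElem?_getD]
  rw [List.getElem?_set_self hrv, Option.getD_some,
    List.getElem?_set_self (by rw [List.getD_eq_getElem?_getD] at hrow; omega), Option.getD_some]

theorem pvVis_mark_ne (v : List (List Bool)) (a b r c : Nat)
    (hne : ¬ (a = r ∧ b = c)) : pvVis (pvMark v a b) r c = pvVis v r c := by
  unfold pvVis pvMark
  by_cases har : a = r
  · subst har
    have hbc : b ≠ c := fun e => hne ⟨rfl, e⟩
    by_cases hav : a < v.length
    · simp only [List.getD_eq_getElem?_getD]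
      rw [List.getElem?_set_self hav, Option.getD_some, List.getElem?_set_ne hbc]
    · rw [List.set_eq_of_length_le (by omega)]
  · simp only [List.getD_eq_getElem?_getD]
    rw [List.getElem?_set_ne har]

-- the empty set is related to A's all-false matrix

theorem pvVis_replicate (a b r c : Nat) :
    pvVis (List.replicate a (List.replicate b false)) r c = false := by
  simp only [pvVis, List.getD_eq_getElem?_getD]
  by_cases h : r < a
  · rw [List.getElem?_replicate_of_lt h, Option.getD_some]
    by_cases h2 : c < b
    · rw [List.getElem?_replicate_of_lt h2, Option.getD_some]
    · have h3 : (List.replicate b false)[c]? = none :=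
        List.getElem?_eq_none (by simp only [List.length_replicate]; omega)
      rw [h3]
      rfl
  · have h3 : (List.replicate a (List.replicate b false))[r]? = none :=
      List.getElem?_eq_none (by simp only [List.length_replicate]; omega)
    rw [h3]
    rfl

theorem pvRel_init (rows cols : Nat) :
    pvRel rows cols (List.replicate rows (List.replicate cols false)) [] := by
  refine ⟨List.nodup_nil, fun p => ?_⟩
  simp [pvVis_replicate]

-- marking a fresh in-bounds cell preserves the relation

theorem pvRel_mark (rows cols : Nat) (v : List (List Bool)) (S : List (Int × Int)) (r c : Int)
    (hwf : pvWf rows cols v) (hrel : pvRel rows cols v S)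
    (hr0 : 0 ≤ r) (hr : r < (rows : Int)) (hc0 : 0 ≤ c) (hc : c < (cols : Int))
    (hv : pvVis v r.toNat c.toNat = false) :
    pvRel rows cols (pvMark v r.toNat c.toNat) ((r, c) :: S) := by
  obtain ⟨hnd, hiff⟩ := hrel
  have hnotmem : (r, c) ∉ S := by
    intro hmem
    have := (hiff (r, c)).1 hmem
    simp [hv] at this
  refine ⟨List.nodup_cons.2 ⟨hnotmem, hnd⟩, fun p => ?_⟩
  constructor
  · intro hmem
    rcases List.mem_cons.1 hmem with h | h
    · subst h
      exact ⟨hr0, hr, hc0, hc, pvVis_mark_self rows cols v r.toNat c.toNat hwf (by omega) (by omega)⟩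
    · obtain ⟨p1, p2, p3, p4, p5⟩ := (hiff p).1 h
      refine ⟨p1, p2, p3, p4, ?_⟩
      rw [pvVis_mark_ne]
      · exact p5
      · intro ⟨e1, e2⟩
        have : p = (r, c) := by
          obtain ⟨x, y⟩ := p; simp at p1 p3 e1 e2 ⊢; omega
        subst this
        exact hnotmem h
  · intro ⟨p1, p2, p3, p4, p5⟩
    by_cases heq : r.toNat = p.1.toNat ∧ c.toNat = p.2.toNat
    · have : p = (r, c) := by
        obtain ⟨x, y⟩ := p; obtain ⟨e1, e2⟩ := heq; simp at p1 p3 e1 e2 ⊢; omega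
      simp [this]
    · rw [pvVis_mark_ne _ _ _ _ _ heq] at p5
      exact List.mem_cons_of_mem _ ((hiff p).2 ⟨p1, p2, p3, p4, p5⟩)

-- dimension/measure invariant of A's flood fill (verbatim over floodA)

theorem flood_inv (board : List (List String)) (rowsN colsN : Nat) (ch : String) :
    ∀ (fuel : Nat) (r c : Int) (v : List (List Bool)), pvWf rowsN colsN v →
      pvWf rowsN colsN (floodA board (rowsN : Int) (colsN : Int) ch fuel r c v).2 ∧
      pvUnvis (floodA board (rowsN : Int) (colsN : Int) ch fuel r c v).2 ≤ pvUnvis v := by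
  intro fuel
  induction fuel with
  | zero =>
    intro r c v hwf
    rw [floodA]
    split
    · exact ⟨hwf, le_refl _⟩
    · split
      · exact ⟨hwf, le_refl _⟩
      · exact ⟨hwf, le_refl _⟩
  | succ fuel ih =>
    intro r c v hwf
    rw [floodA]
    split
    · exact ⟨hwf, le_refl _⟩
    split
    · exact ⟨hwf, le_refl _⟩
    rename_i hin hcell
    push_neg at hin
    have hr : r.toNat < rowsN := by omega
    have hc : c.toNat < colsN := by omega
    have hvfalse : pvVis v r.toNat c.toNat = false := by
      cases h : pvVis v r.toNat c.toNat
      · rfl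
      · exact absurd (Or.inl h) hcell
    have hwf0 := pvWf_mark rowsN colsN v r.toNat c.toNat hwf
    have hun0 := pvUnvis_mark rowsN colsN v r.toNat c.toNat hwf hr hc hvfalse
    have h1 := ih (r + 1) c _ hwf0
    have h2 := ih (r - 1) c _ h1.1
    have h3 := ih r (c + 1) _ h2.1
    have h4 := ih r (c - 1) _ h3.1
    dsimp only
    exact ⟨h4.1, by omega⟩

-- equation lemmas for floodA

theorem floodA_out (board : List (List String)) (rows cols : Int) (ch : String)
    (fuel : Nat) (r c : Int) (v : List (List Bool))
    (hg : r < 0 ∨ rows ≤ r ∨ c < 0 ∨ cols ≤ c) :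
    floodA board rows cols ch fuel r c v = (0, v) := by
  rw [floodA.eq_def]
  simp only [if_pos hg]

theorem floodA_vis (board : List (List String)) (rows cols : Int) (ch : String)
    (fuel : Nat) (r c : Int) (v : List (List Bool))
    (hg : ¬ (r < 0 ∨ rows ≤ r ∨ c < 0 ∨ cols ≤ c))
    (hv : pvVis v r.toNat c.toNat = true ∨ ¬ pvCell board r.toNat c.toNat = ch) :
    floodA board rows cols ch fuel r c v = (0, v) := by
  rw [floodA.eq_def]
  simp only [if_neg hg, if_pos hv]

theorem floodA_mark (board : List (List String)) (rows cols : Int) (ch : String)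
    (fuel : Nat) (r c : Int) (v : List (List Bool))
    (hg : ¬ (r < 0 ∨ rows ≤ r ∨ c < 0 ∨ cols ≤ c))
    (hv : ¬ (pvVis v r.toNat c.toNat = true ∨ ¬ pvCell board r.toNat c.toNat = ch)) :
    floodA board rows cols ch (fuel + 1) r c v =
      (let v0 := pvMark v r.toNat c.toNat
       let p1 := floodA board rows cols ch fuel (r + 1) c v0
       let p2 := floodA board rows cols ch fuel (r - 1) c p1.2
       let p3 := floodA board rows cols ch fuel r (c + 1) p2.2
       let p4 := floodA board rows cols ch fuel r (c - 1) p3.2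
       (1 + p1.1 + p2.1 + p3.1 + p4.1, p4.2)) := by
  rw [floodA.eq_def]
  simp only [if_neg hg, if_neg hv]

theorem floodA_zero (board : List (List String)) (rows cols : Int) (ch : String)
    (r c : Int) (v : List (List Bool)) :
    floodA board rows cols ch 0 r c v = (0, v) := by
  rw [floodA.eq_def]
  dsimp only
  split
  · rfl
  split
  · rfl
  rfl

-- equation lemmas for fillB

theorem fillB_nil (board : List (List String)) (rows cols : Int) (ch : String)
    (fuel : Nat) (area : Int) (vis : List (Int × Int)) :
    fillB board rows cols ch fuel [] area vis = (area, vis) := by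
  rw [fillB.eq_def]

theorem fillB_visited (board : List (List String)) (rows cols : Int) (ch : String)
    (fuel : Nat) (cell : Int × Int) (stack : List (Int × Int)) (area : Int)
    (vis : List (Int × Int)) (h : vis.contains cell = true) :
    fillB board rows cols ch fuel (cell :: stack) area vis =
    fillB board rows cols ch fuel stack area vis := by
  rw [fillB.eq_def]
  simp only [h, if_pos]

theorem fillB_skip (board : List (List String)) (rows cols : Int) (ch : String)
    (fuel : Nat) (cell : Int × Int) (stack : List (Int × Int)) (area : Int)
    (vis : List (Int × Int)) (h : ¬ vis.contains cell = true)
    (hg : ¬ (0 ≤ cell.1 ∧ cell.1 < rows ∧ 0 ≤ cell.2 ∧ cell.2 < cols ∧ cellB board cell = ch)) :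
    fillB board rows cols ch fuel (cell :: stack) area vis =
    fillB board rows cols ch fuel stack area vis := by
  rw [fillB.eq_def]
  simp only [if_neg h, if_neg hg]

theorem fillB_mark (board : List (List String)) (rows cols : Int) (ch : String)
    (fuel : Nat) (cell : Int × Int) (stack : List (Int × Int)) (area : Int)
    (vis : List (Int × Int)) (h : ¬ vis.contains cell = true)
    (hg : 0 ≤ cell.1 ∧ cell.1 < rows ∧ 0 ≤ cell.2 ∧ cell.2 < cols ∧ cellB board cell = ch) :
    fillB board rows cols ch (fuel + 1) (cell :: stack) area vis =
    fillB board rows cols ch fuel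
      ((cell.1 + 1, cell.2) :: (cell.1 - 1, cell.2) :: (cell.1, cell.2 + 1) :: (cell.1, cell.2 - 1) :: stack)
      (area + 1) (cell :: vis) := by
  rw [fillB.eq_def]
  simp only [if_neg h, if_pos hg]

-- membership and the matrix, through the relation

theorem pvRel_contains (rows cols : Nat) (v : List (List Bool)) (S : List (Int × Int))
    (hrel : pvRel rows cols v S) (p : Int × Int) :
    S.contains p = true ↔ 0 ≤ p.1 ∧ p.1 < (rows : Int) ∧ 0 ≤ p.2 ∧ p.2 < (cols : Int) ∧
      pvVis v p.1.toNat p.2.toNat = true := by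
  rw [List.contains_iff_mem]
  exact hrel.2 p

-- fuel irrelevance for fillB: any fuel at least the number of unvisited cells gives the same run

theorem fillB_fuel (board : List (List String)) (rowsN colsN : Nat) (ch : String) :
    ∀ (fuel1 : Nat) (stack : List (Int × Int)) (fuel2 : Nat) (area : Int)
      (v : List (List Bool)) (S : List (Int × Int)),
      pvWf rowsN colsN v → pvRel rowsN colsN v S → pvUnvis v ≤ fuel1 → pvUnvis v ≤ fuel2 →
      fillB board (rowsN : Int) (colsN : Int) ch fuel1 stack area S =
      fillB board (rowsN : Int) (colsN : Int) ch fuel2 stack area S := by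
  intro fuel1
  induction fuel1 using Nat.strong_induction_on with
  | _ fuel1 ihf =>
    intro stack
    induction stack with
    | nil => intro fuel2 area v S _ _ _ _; rw [fillB_nil, fillB_nil]
    | cons cell tl ihs =>
      intro fuel2 area v S hwf hrel h1 h2
      by_cases hmem : S.contains cell = true
      · rw [fillB_visited _ _ _ _ _ _ _ _ _ hmem, fillB_visited _ _ _ _ _ _ _ _ _ hmem]
        exact ihs fuel2 area v S hwf hrel h1 h2
      · by_cases hg : 0 ≤ cell.1 ∧ cell.1 < (rowsN : Int) ∧ 0 ≤ cell.2 ∧ cell.2 < (colsN : Int) ∧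
            cellB board cell = ch
        · have hv : pvVis v cell.1.toNat cell.2.toNat = false := by
            cases h : pvVis v cell.1.toNat cell.2.toNat
            · rfl
            · exact absurd ((pvRel_contains rowsN colsN v S hrel cell).2
                ⟨hg.1, hg.2.1, hg.2.2.1, hg.2.2.2.1, h⟩) hmem
          have hpos := pvUnvis_pos rowsN colsN v cell.1.toNat cell.2.toNat hwf
            (by omega) (by omega) hv
          cases fuel1 with
          | zero => omega
          | succ fuel1 =>
            cases fuel2 with
            | zero => omega
            | succ fuel2 =>
              rw [fillB_mark _ _ _ _ _ _ _ _ _ hmem hg, fillB_mark _ _ _ _ _ _ _ _ _ hmem hg]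
              have hwf0 := pvWf_mark rowsN colsN v cell.1.toNat cell.2.toNat hwf
              have hrel0 := pvRel_mark rowsN colsN v S cell.1 cell.2 hwf hrel
                hg.1 hg.2.1 hg.2.2.1 hg.2.2.2.1 hv
              have hun0 := pvUnvis_mark rowsN colsN v cell.1.toNat cell.2.toNat hwf
                (by omega) (by omega) hv
              exact ihf fuel1 (by omega) _ fuel2 (area + 1) _ (cell :: S) hwf0
                (by simpa using hrel0) (by omega) (by omega)
        · rw [fillB_skip _ _ _ _ _ _ _ _ _ hmem hg, fillB_skip _ _ _ _ _ _ _ _ _ hmem hg]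
          exact ihs fuel2 area v S hwf hrel h1 h2

-- the simulation: popping one seed off B's stack performs exactly A's flood fill from that seed

theorem fill_sim (board : List (List String)) (rowsN colsN : Nat) (ch : String) :
    ∀ (fuel : Nat) (r c : Int) (stack : List (Int × Int)) (area : Int)
      (v : List (List Bool)) (S : List (Int × Int)),
      pvWf rowsN colsN v → pvRel rowsN colsN v S → pvUnvis v ≤ fuel →
      ∃ S', pvRel rowsN colsN (floodA board (rowsN : Int) (colsN : Int) ch fuel r c v).2 S' ∧
        fillB board (rowsN : Int) (colsN : Int) ch fuel ((r, c) :: stack) area S =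
        fillB board (rowsN : Int) (colsN : Int) ch fuel stack
          (area + (floodA board (rowsN : Int) (colsN : Int) ch fuel r c v).1) S' := by
  intro fuel
  induction fuel with
  | zero =>
    intro r c stack area v S hwf hrel h1
    refine ⟨S, ?_, ?_⟩
    · rw [floodA_zero]; exact hrel
    by_cases hmem : S.contains (r, c) = true
    · rw [floodA_zero, fillB_visited _ _ _ _ _ _ _ _ _ hmem]
      simp only [add_zero]
    · by_cases hg : 0 ≤ r ∧ r < (rowsN : Int) ∧ 0 ≤ c ∧ c < (colsN : Int) ∧
          cellB board (r, c) = ch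
      · have hv : pvVis v r.toNat c.toNat = false := by
          cases h : pvVis v r.toNat c.toNat
          · rfl
          · exact absurd ((pvRel_contains rowsN colsN v S hrel (r, c)).2
              ⟨hg.1, hg.2.1, hg.2.2.1, hg.2.2.2.1, h⟩) hmem
        have := pvUnvis_pos rowsN colsN v r.toNat c.toNat hwf (by omega) (by omega) hv
        omega
      · rw [floodA_zero, fillB_skip _ _ _ _ _ _ _ _ _ hmem hg]
        simp only [add_zero]
  | succ fuel ih =>
    intro r c stack area v S hwf hrel h1
    by_cases hmem : S.contains (r, c) = true
    · obtain ⟨hr0, hr, hc0, hc, hv⟩ := (pvRel_contains rowsN colsN v S hrel (r, c)).1 hmem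
      refine ⟨S, ?_, ?_⟩
      · rw [floodA_vis _ _ _ _ _ _ _ _ (by omega) (Or.inl hv)]; exact hrel
      · rw [floodA_vis _ _ _ _ _ _ _ _ (by omega) (Or.inl hv),
          fillB_visited _ _ _ _ _ _ _ _ _ hmem]
        simp only [add_zero]
    · by_cases hg : 0 ≤ r ∧ r < (rowsN : Int) ∧ 0 ≤ c ∧ c < (colsN : Int) ∧
          cellB board (r, c) = ch
      · obtain ⟨hr0, hr, hc0, hc, hcell⟩ := hg
        have hv : pvVis v r.toNat c.toNat = false := by
          cases h : pvVis v r.toNat c.toNat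
          · rfl
          · exact absurd ((pvRel_contains rowsN colsN v S hrel (r, c)).2
              ⟨hr0, hr, hc0, hc, h⟩) hmem
        have hgA : ¬ (r < 0 ∨ (rowsN : Int) ≤ r ∨ c < 0 ∨ (colsN : Int) ≤ c) := by omega
        have hvA : ¬ (pvVis v r.toNat c.toNat = true ∨ ¬ pvCell board r.toNat c.toNat = ch) := by
          simp [hv]
          exact hcell
        rw [floodA_mark _ _ _ _ _ _ _ _ hgA hvA]
        rw [fillB_mark _ _ _ _ _ _ _ _ _ hmem ⟨hr0, hr, hc0, hc, hcell⟩]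
        dsimp only
        have hwf0 := pvWf_mark rowsN colsN v r.toNat c.toNat hwf
        have hrel0 := pvRel_mark rowsN colsN v S r c hwf hrel hr0 hr hc0 hc hv
        have hun0 := pvUnvis_mark rowsN colsN v r.toNat c.toNat hwf (by omega) (by omega) hv
        have i1 := flood_inv board rowsN colsN ch fuel (r + 1) c _ hwf0
        have i2 := flood_inv board rowsN colsN ch fuel (r - 1) c _ i1.1
        have i3 := flood_inv board rowsN colsN ch fuel r (c + 1) _ i2.1
        have i4 := flood_inv board rowsN colsN ch fuel r (c - 1) _ i3.1
        obtain ⟨S1, hS1, e1⟩ := ih (r + 1) c _ (area + 1) _ ((r, c) :: S) hwf0 hrel0 (by omega)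
        obtain ⟨S2, hS2, e2⟩ := ih (r - 1) c _ _ _ S1 i1.1 hS1 (by omega)
        obtain ⟨S3, hS3, e3⟩ := ih r (c + 1) _ _ _ S2 i2.1 hS2 (by omega)
        obtain ⟨S4, hS4, e4⟩ := ih r (c - 1) _ _ _ S3 i3.1 hS3 (by omega)
        refine ⟨S4, hS4, ?_⟩
        rw [e1, e2, e3, e4]
        rw [fillB_fuel board rowsN colsN ch fuel stack (fuel + 1) _ _ S4 i4.1 hS4
          (by omega) (by omega)]
        congr 1
        ring
      · refine ⟨S, ?_, ?_⟩
        · have : floodA board (rowsN : Int) (colsN : Int) ch (fuel + 1) r c v = (0, v) := by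
            by_cases hgA : r < 0 ∨ (rowsN : Int) ≤ r ∨ c < 0 ∨ (colsN : Int) ≤ c
            · exact floodA_out _ _ _ _ _ _ _ _ hgA
            · refine floodA_vis _ _ _ _ _ _ _ _ hgA (Or.inr ?_)
              intro hcell
              exact hg ⟨by omega, by omega, by omega, by omega, hcell⟩
          rw [this]; exact hrel
        · have hfl : floodA board (rowsN : Int) (colsN : Int) ch (fuel + 1) r c v = (0, v) := by
            by_cases hgA : r < 0 ∨ (rowsN : Int) ≤ r ∨ c < 0 ∨ (colsN : Int) ≤ c
            · exact floodA_out _ _ _ _ _ _ _ _ hgA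
            · refine floodA_vis _ _ _ _ _ _ _ _ hgA (Or.inr ?_)
              intro hcell
              exact hg ⟨by omega, by omega, by omega, by omega, hcell⟩
          rw [hfl, fillB_skip _ _ _ _ _ _ _ _ _ hmem hg]
          simp only [add_zero]

-- relational fold: two folds over the same list preserve a relation between their states

theorem foldl_rel_mem {α σ τ : Type} (R : σ → τ → Prop) (f : σ → α → σ) (g : τ → α → τ) :
    ∀ (l : List α), (∀ a ∈ l, ∀ s t, R s t → R (f s a) (g t a)) →
      ∀ s t, R s t → R (l.foldl f s) (l.foldl g t) := by
  intro l
  induction l with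
  | nil => intro _ s t h; exact h
  | cons a tl ih =>
    intro hstep s t h
    exact ih (fun b hb => hstep b (List.mem_cons_of_mem _ hb)) _ _
      (hstep a (List.mem_cons_self) s t h)

-- the main equality

theorem main_eq (board : List (List String)) :
    get_region_info board = get_region_info_alt board := by
  rw [get_region_info, get_region_info_alt]
  dsimp only
  rw [PySem.List.enumerate_eq_map_pyRange board [], PySem.List.len_eq,
    PySem.List.pyRange_zero_natCast, List.foldl_map, List.foldl_map]
  refine congrArg PySem.Dict.items
    (foldl_rel_mem
      (fun (a : List (List Bool) × PySem.Dict String Int)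
           (b : List (Int × Int) × PySem.Dict String Int) =>
        pvWf board.length (board.getD 0 []).length a.1 ∧
        pvRel board.length (board.getD 0 []).length a.1 b.1 ∧ a.2 = b.2)
      _ _ (List.range board.length) ?_ _ _
      ⟨⟨by simp, fun row hrow => by simp [List.eq_of_mem_replicate hrow]⟩,
        pvRel_init _ _, rfl⟩).2.2
  intro r hrmem s t hst
  have hrlt : r < board.length := List.mem_range.1 hrmem
  dsimp only
  refine foldl_rel_mem
    (fun (a : List (List Bool) × PySem.Dict String Int)
         (b : List (Int × Int) × PySem.Dict String Int) =>
      pvWf board.length (board.getD 0 []).length a.1 ∧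
      pvRel board.length (board.getD 0 []).length a.1 b.1 ∧ a.2 = b.2)
    _ _ (List.range (board.getD 0 []).length) ?_ s t hst
  intro c hcmem st stb hR
  obtain ⟨hwf, hrel, hdict⟩ := hR
  have hclt : c < (board.getD 0 []).length := List.mem_range.1 hcmem
  simp only [PySem.List.pyGetD_natCast, pvCell]
  have hcontains : stb.1.contains ((r : Int), (c : Int)) = pvVis st.1 r c := by
    cases hvv : pvVis st.1 r c
    · refine Bool.eq_false_iff.2 fun hcon => ?_
      obtain ⟨_, _, _, _, h5⟩ := (pvRel_contains _ _ _ _ hrel _).1 hcon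
      simp only [Int.toNat_natCast] at h5
      rw [hvv] at h5
      exact Bool.false_ne_true h5
    · exact (pvRel_contains _ _ _ _ hrel _).2
        ⟨by simp, by simpa using hrlt, by simp, by simpa using hclt, by simpa using hvv⟩
  by_cases hgA : pvVis st.1 r c = false ∧ ¬ (board.getD r []).getD c "" ∈ ["-", "+"]
  · have hch2 : (board.getD r []).getD c "" ≠ "-" ∧ (board.getD r []).getD c "" ≠ "+" := by
      have h2 := hgA.2
      simp [not_or] at h2
      exact h2
    have hgB : stb.1.contains ((r : Int), (c : Int)) = false ∧
        (board.getD r []).getD c "" ≠ "-" ∧ (board.getD r []).getD c "" ≠ "+" :=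
      ⟨by rw [hcontains]; exact hgA.1, hch2.1, hch2.2⟩
    rw [if_pos hgA, if_pos hgB]
    have hle := pvUnvis_le board.length (board.getD 0 []).length st.1 hwf
    obtain ⟨S', hS', heq⟩ := fill_sim board board.length (board.getD 0 []).length
      ((board.getD r []).getD c "") (board.length * (board.getD 0 []).length)
      (r : Int) (c : Int) [] 0 st.1 stb.1 hwf hrel (by omega)
    rw [heq, fillB_nil]
    refine ⟨(flood_inv board board.length (board.getD 0 []).length _ _ _ _ _ hwf).1, hS', ?_⟩
    dsimp only
    rw [hdict]
    simp
  · have hgB : ¬ (stb.1.contains ((r : Int), (c : Int)) = false ∧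
        (board.getD r []).getD c "" ≠ "-" ∧ (board.getD r []).getD c "" ≠ "+") := by
      rintro ⟨b1, b2, b3⟩
      rw [hcontains] at b1
      refine hgA ⟨b1, ?_⟩
      simp only [List.mem_cons, List.not_mem_nil, or_false, not_or]
      exact ⟨b2, b3⟩
    rw [if_neg hgA, if_neg hgB]
    exact ⟨hwf, hrel, hdict⟩

-- ===== VERDICT (by name: the statement is the Claim_ definition above) =====
theorem get_region_info_spec : Claim_equal_get_region_info := by
  intro board _ _
  exact main_eq board
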